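-- pv_equiv track=rewrite | github.com/KcRobin9/MM1-Map-Editor | MAP_EDITOR_ALPHA_v1.py | truncate_always_visible
-- ===== SOURCE A (Python) =====
-- from typing import List, Dict, Set, Any, Union, Tuple, Optional, BinaryIO
--
-- class Threshold:
--     BLITZ_WAYPOINT_COUNT = 11
--     CHECKPOINT_RACE_COUNT = 12
--     BLITZ_AND_CIRCUIT_RACE_COUNT = 15
--     MESH_VERTEX_COUNT = 16
--     CELL_TYPE_SWITCH = 200
--     CELL_CHARACTER_WARNING = 200
--     CELL_CHARACTER_LIMIT = 0xFF
--     VERTEX_INDEX_COUNT = 0x8000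
--
-- class LevelOfDetail:
--     UNKNOWN_1 = 0x1    # A
--     LOW = 0x2          # L
--     MEDIUM = 0x4       # M
--     HIGH = 0x8         # H
--     DRIFT = 0x20       # A2
--     UNKNOWN_2 = 0x40   # L2
--     UNKNOWN_3 = 0x80   # M2
--     UNKNOWN_4 = 0x100  # H2
--
-- def write_cell_row(cell_id: int, cell_type: int, always_visible_data: str, mesh_a2_files: Set[int]) -> str:
--     model = LevelOfDetail.DRIFT if cell_id in mesh_a2_files else LevelOfDetail.HIGH
--     return f"{cell_id},{model},{cell_type}{always_visible_data}\n"
--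
-- def truncate_always_visible(always_visible_cell_ids: List[int], cell_id: int, cell_type: int, mesh_a2_files: Set[int]) -> Tuple[str, int]:
--     always_visible_count = len(always_visible_cell_ids)
--     always_visible_data = f",{always_visible_count},{','.join(map(str, always_visible_cell_ids))}"
--     cell_row = write_cell_row(cell_id, cell_type, always_visible_data, mesh_a2_files)
--
--     while len(cell_row) >= Threshold.CELL_CHARACTER_LIMIT:
--         always_visible_cell_ids.pop()
--         always_visible_count = len(always_visible_cell_ids)
--         always_visible_data = f",{always_visible_count},{','.join(map(str, always_visible_cell_ids))}"
--         cell_row = write_cell_row(cell_id, cell_type, always_visible_data, mesh_a2_files)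
--
--     return cell_row, len(cell_row)
-- ===== SOURCE B (Python) =====
-- # B: computes lengths once (prefix sums of id-string lengths), binary-searches the largest
-- # kept count whose formatted row is under the limit, and formats the row once.
-- CELL_CHARACTER_LIMIT = 0xFF
-- DRIFT = 0x20
-- HIGH = 0x8
--
-- def truncate_always_visible(always_visible_cell_ids, cell_id, cell_type, mesh_a2_files):
--     model = DRIFT if cell_id in mesh_a2_files else HIGH
--     head = f"{cell_id},{model},{cell_type},"
--     # pre[k] = total length of ",".join of the first k ids, plus one (a "," per id)
--     pre = [0]
--     for x in always_visible_cell_ids: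
--         pre.append(pre[-1] + len(str(x)) + 1)
--
--     def row_len(k):
--         join_len = pre[k] - 1 if k > 0 else 0
--         return len(head) + len(str(k)) + 1 + join_len + 1
--
--     # largest k with row_len(k) < limit (row_len is nondecreasing in k); floor at 0
--     lo, hi = 0, len(always_visible_cell_ids)
--     while lo < hi:
--         mid = (lo + hi + 1) // 2
--         if row_len(mid) < CELL_CHARACTER_LIMIT:
--             lo = mid
--         else:
--             hi = mid - 1
--     k = lo
--
--     del always_visible_cell_ids[k:]  # same in-place truncation A performs via pop()
--     row = head + str(k) + "," + ",".join(map(str, always_visible_cell_ids)) + "\n"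
--     return row, len(row)
-- ===== Notes on version B (the rewrite author's own statement) =====
-- stated objective: faster
-- what changed: Instead of popping one id at a time and re-joining the whole list each iteration, B builds prefix sums of the id-string lengths once, binary-searches the largest kept count whose row length is under the 255-char limit, and formats the row once.
import Mathlib
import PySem

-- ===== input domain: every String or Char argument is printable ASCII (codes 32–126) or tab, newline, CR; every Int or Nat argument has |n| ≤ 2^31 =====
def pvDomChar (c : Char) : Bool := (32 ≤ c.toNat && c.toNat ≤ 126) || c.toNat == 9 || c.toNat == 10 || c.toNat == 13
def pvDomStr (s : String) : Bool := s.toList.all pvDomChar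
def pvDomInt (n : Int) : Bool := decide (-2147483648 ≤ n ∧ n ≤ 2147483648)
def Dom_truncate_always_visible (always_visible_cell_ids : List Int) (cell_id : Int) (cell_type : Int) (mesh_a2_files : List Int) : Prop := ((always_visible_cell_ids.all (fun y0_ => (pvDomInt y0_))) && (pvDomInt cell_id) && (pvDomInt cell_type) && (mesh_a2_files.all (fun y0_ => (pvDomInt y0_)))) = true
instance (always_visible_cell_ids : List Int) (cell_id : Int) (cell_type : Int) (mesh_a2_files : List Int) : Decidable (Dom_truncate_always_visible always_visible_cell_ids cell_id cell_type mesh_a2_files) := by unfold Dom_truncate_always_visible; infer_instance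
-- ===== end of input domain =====

-- B replaces A's pop-and-rejoin loop by prefix sums of the id-string lengths plus a binary
-- search for the largest kept count, formatting the row once. A truncates its list argument
-- in place (pop) and B does the same (del); the equivalence proved here is about the return value.


-- ===== PORT A =====
-- ','.join(map(str, ids))  (the join both Pythons' f-strings perform)
def pvJoinIds (ids : List Int) : List Char :=
  PySem.Chars.join [','] (ids.map PySem.Int.toChars)

-- write_cell_row(cell_id, cell_type, always_visible_data, mesh_a2_files), as a char list
def pvWriteCellRow (cell_id : Int) (cell_type : Int) (data : List Char) (mesh_a2_files : List Int) : List Char :=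
  let model : Int := if mesh_a2_files.contains cell_id then 32 else 8
  PySem.Int.toChars cell_id ++ ',' :: PySem.Int.toChars model ++ ',' :: PySem.Int.toChars cell_type ++ data ++ ['\n']

-- f",{always_visible_count},{','.join(map(str, always_visible_cell_ids))}"
def pvDataA (ids : List Int) : List Char :=
  ',' :: PySem.Int.toChars (ids.length : Int) ++ ',' :: pvJoinIds ids

-- A's while-loop: recompute the row, pop the last id while the row is too long.
-- (On [] Python's ids.pop() would raise IndexError; that branch is unreachable on
-- Dom_, where the empty row is always shorter than 255 characters.)
def pvLoopA (cell_id : Int) (cell_type : Int) (mesh_a2_files : List Int) (ids : List Int) : String × Int :=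
  let row := pvWriteCellRow cell_id cell_type (pvDataA ids) mesh_a2_files
  if 255 ≤ row.length then
    match h : ids with
    | [] => (String.ofList row, (row.length : Int))
    | _ :: _ => pvLoopA cell_id cell_type mesh_a2_files ids.dropLast
  else (String.ofList row, (row.length : Int))
termination_by ids.length
decreasing_by simp [h, List.length_dropLast]

def truncate_always_visible (always_visible_cell_ids : List Int) (cell_id : Int) (cell_type : Int) (mesh_a2_files : List Int) : String × Int :=
  pvLoopA cell_id cell_type mesh_a2_files always_visible_cell_ids

-- ===== PORT B =====
-- head = f"{cell_id},{model},{cell_type},"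
def pvHeadB (cell_id : Int) (cell_type : Int) (mesh_a2_files : List Int) : List Char :=
  let model : Int := if mesh_a2_files.contains cell_id then 32 else 8
  PySem.Int.toChars cell_id ++ ',' :: PySem.Int.toChars model ++ ',' :: PySem.Int.toChars cell_type ++ [',']

-- pre = [0]; for x in ids: pre.append(pre[-1] + len(str(x)) + 1)
def pvPreB (ids : List Int) : List Nat :=
  ids.foldl (fun acc x => acc ++ [acc.getLast?.getD 0 + ((PySem.Int.toChars x).length + 1)]) [0]

-- row_len(k)
def pvRowLenB (hlen : Nat) (pre : List Nat) (k : Nat) : Nat :=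
  let joinLen := if 0 < k then pre.getD k 0 - 1 else 0
  hlen + (PySem.Int.toChars (k : Int)).length + 1 + joinLen + 1

-- while lo < hi: mid = (lo+hi+1)//2; lo = mid if ok(mid) else hi = mid-1
def pvBsearch (ok : Nat → Bool) (lo hi : Nat) : Nat :=
  if h : lo < hi then
    let mid := (lo + hi + 1) / 2
    if ok mid then pvBsearch ok mid hi else pvBsearch ok lo (mid - 1)
  else lo
termination_by hi - lo
decreasing_by all_goals omega

def truncate_always_visible_alt (always_visible_cell_ids : List Int) (cell_id : Int) (cell_type : Int) (mesh_a2_files : List Int) : String × Int :=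
  let head := pvHeadB cell_id cell_type mesh_a2_files
  let pre := pvPreB always_visible_cell_ids
  let k := pvBsearch (fun m => pvRowLenB head.length pre m < 255) 0 always_visible_cell_ids.length
  let row := head ++ PySem.Int.toChars (k : Int) ++ ',' :: pvJoinIds (always_visible_cell_ids.take k) ++ ['\n']
  (String.ofList row, (row.length : Int))

-- ===== PRECONDITION & SPEC =====
def Spec_truncate_always_visible (always_visible_cell_ids : List Int) (cell_id : Int) (cell_type : Int) (mesh_a2_files : List Int) (out : String × Int) : Prop := out = truncate_always_visible_alt always_visible_cell_ids cell_id cell_type mesh_a2_files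
instance (always_visible_cell_ids : List Int) (cell_id : Int) (cell_type : Int) (mesh_a2_files : List Int) (out : String × Int) : Decidable (Spec_truncate_always_visible always_visible_cell_ids cell_id cell_type mesh_a2_files out) := by unfold Spec_truncate_always_visible; infer_instance

-- ===== CLAIM (what is proved, stated in full; the proofs are below) =====
def Claim_equal_truncate_always_visible : Prop := ∀ (always_visible_cell_ids : List Int) (cell_id : Int) (cell_type : Int) (mesh_a2_files : List Int), Dom_truncate_always_visible always_visible_cell_ids cell_id cell_type mesh_a2_files → Spec_truncate_always_visible always_visible_cell_ids cell_id cell_type mesh_a2_files (truncate_always_visible always_visible_cell_ids cell_id cell_type mesh_a2_files)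

-- ===== LEMMAS AND PROOFS =====

-- len(str(x)) plus one for the comma in front of x
def pvW (x : Int) : Nat := (PySem.Int.toChars x).length + 1

def pvSS (l : List Int) : Nat := (l.map pvW).sum

-- the largest k ≤ m with ok k, floored at 0 (ok 0 is never consulted)
def pvBest (ok : Nat → Bool) : Nat → Nat
  | 0 => 0
  | (m + 1) => if ok (m + 1) then m + 1 else pvBest ok m

theorem pvSS_pos_le (l : List Int) : l.length ≤ pvSS l := by
  induction l with
  | nil => simp [pvSS]
  | cons x xs ih => simp [pvSS, pvW] at *; omega

theorem pvJoinIds_length (l : List Int) :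
    (pvJoinIds l).length = if l = [] then 0 else pvSS l - 1 := by
  induction l with
  | nil => simp [pvJoinIds, PySem.Chars.join_nil]
  | cons x xs ih =>
    cases xs with
    | nil => simp [pvJoinIds, PySem.Chars.join_singleton, pvSS, pvW]
    | cons y ys =>
      have h1 := pvSS_pos_le (y :: ys)
      simp only [pvJoinIds, List.map_cons] at *
      rw [PySem.Chars.join_cons_cons]
      simp [List.length_append, pvSS, pvW] at *
      omega

theorem pvPreB_eq (ids : List Int) :
    pvPreB ids = (List.range (ids.length + 1)).map (fun k => pvSS (ids.take k)) := by
  induction ids using List.reverseRecOn with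
  | nil => simp [pvPreB, pvSS]
  | append_singleton ids x ih =>
    have hlast : (pvPreB ids).getLast?.getD 0 = pvSS ids := by
      rw [ih]
      rw [List.range_succ]
      simp
    rw [pvPreB, List.foldl_append]
    simp only [List.foldl]
    rw [show (List.foldl (fun acc x => acc ++ [acc.getLast?.getD 0 + ((PySem.Int.toChars x).length + 1)]) [0] ids) = pvPreB ids from rfl]
    rw [hlast, ih]
    rw [List.length_append, List.length_singleton]
    rw [show List.range (ids.length + 1 + 1) = List.range (ids.length + 1) ++ [ids.length + 1] from List.range_succ, List.map_append]
    congr 1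
    · apply List.map_congr_left
      intro k hk
      simp [List.mem_range] at hk
      rw [List.take_append_of_le_length (by omega)]
    · simp [pvSS, pvW, List.take_append]
      rw [List.take_of_length_le (by simp)]

theorem pvPreB_getD (ids : List Int) {k : Nat} (hk : k ≤ ids.length) :
    (pvPreB ids).getD k 0 = pvSS (ids.take k) := by
  rw [pvPreB_eq]
  rw [List.getD_eq_getElem?_getD]
  rw [List.getElem?_map]
  rw [List.getElem?_range (by omega)]
  simp

theorem pvSS_take_mono (ids : List Int) {j k : Nat} (h : j ≤ k) :
    pvSS (ids.take j) ≤ pvSS (ids.take k) := by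
  have : ids.take j = (ids.take k).take j := by rw [List.take_take, Nat.min_eq_left h]
  rw [this]
  calc pvSS ((ids.take k).take j)
      ≤ pvSS ((ids.take k).take j) + pvSS ((ids.take k).drop j) := Nat.le_add_right _ _
    _ = pvSS ((ids.take k).take j ++ (ids.take k).drop j) := by simp [pvSS]
    _ = pvSS (ids.take k) := by rw [List.take_append_drop]

theorem pvDigits_mono {a b : Nat} (h : a ≤ b) :
    (Nat.toDigits 10 a).length ≤ (Nat.toDigits 10 b).length := by
  have hb : b < 10 ^ (Nat.toDigits 10 b).length :=
    (Nat.length_toDigits_le_iff (by omega) Nat.length_toDigits_pos).mp le_rfl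
  exact (Nat.length_toDigits_le_iff (by omega) Nat.length_toDigits_pos).mpr (by omega)

theorem pvToChars_natCast (k : Nat) : PySem.Int.toChars (k : Int) = Nat.toDigits 10 k := by
  simp [PySem.Int.toChars]

theorem pvRowLenB_mono (hlen : Nat) (ids : List Int) {j k : Nat} (h : j ≤ k) (hk : k ≤ ids.length) :
    pvRowLenB hlen (pvPreB ids) j ≤ pvRowLenB hlen (pvPreB ids) k := by
  have hD : (PySem.Int.toChars (j : Int)).length ≤ (PySem.Int.toChars (k : Int)).length := by
    rw [pvToChars_natCast, pvToChars_natCast]; exact pvDigits_mono h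
  have hS := pvSS_take_mono ids h
  have hL : (ids.take k).length ≤ pvSS (ids.take k) := pvSS_pos_le _
  have hlen' : (ids.take k).length = k := by simp [List.length_take]; omega
  simp only [pvRowLenB]
  rw [pvPreB_getD ids hk, pvPreB_getD ids (le_trans h hk)]
  split_ifs <;> omega

-- B's arithmetic row_len(k) is the length of A's formatted row on the k-prefix
theorem pvRowLen_eq (cell_id cell_type : Int) (mesh : List Int) (ids : List Int) {k : Nat}
    (hk : k ≤ ids.length) :
    pvRowLenB (pvHeadB cell_id cell_type mesh).length (pvPreB ids) k
      = (pvWriteCellRow cell_id cell_type (pvDataA (ids.take k)) mesh).length := by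
  have hlen' : (ids.take k).length = k := by simp [List.length_take]; omega
  have hj := pvJoinIds_length (ids.take k)
  have hS := pvSS_pos_le (ids.take k)
  rw [hlen'] at hS
  simp only [pvRowLenB, pvWriteCellRow, pvDataA, pvHeadB, List.length_append, List.length_cons,
    hlen']
  rw [pvPreB_getD ids hk]
  by_cases h0 : k = 0
  · subst h0
    have hj0 : (pvJoinIds ([] : List Int)).length = 0 := by simp [pvJoinIds, PySem.Chars.join_nil]
    simp only [List.take_zero, hj0, Nat.cast_zero] at hj ⊢
    rw [if_neg (Nat.lt_irrefl 0)]
    omega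
  · have hne : ids.take k ≠ [] := by
      intro he; rw [he] at hlen'; simp at hlen'; omega
    rw [if_neg hne] at hj
    rw [if_pos (Nat.pos_of_ne_zero h0)]
    omega

theorem pvBest_le (ok : Nat → Bool) (m : Nat) : pvBest ok m ≤ m := by
  induction m with
  | zero => simp [pvBest]
  | succ m ih => simp only [pvBest]; split <;> omega

theorem pvBest_max (ok : Nat → Bool) {m j : Nat} (hj : ok j = true) (hjm : j ≤ m) :
    j ≤ pvBest ok m := by
  induction m with
  | zero => omega
  | succ m ih =>
    simp only [pvBest]; split
    · omega
    · rename_i hnot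
      have : j ≠ m + 1 := by intro he; rw [he] at hj; simp [hj] at hnot
      exact ih (by omega)

theorem pvBest_ok_or_zero (ok : Nat → Bool) (m : Nat) :
    ok (pvBest ok m) = true ∨ pvBest ok m = 0 := by
  induction m with
  | zero => right; simp [pvBest]
  | succ m ih => simp only [pvBest]; split <;> simp_all

theorem pvBest_congr {ok ok' : Nat → Bool} (m : Nat) (h : ∀ j, j ≤ m → ok j = ok' j) :
    pvBest ok m = pvBest ok' m := by
  induction m with
  | zero => rfl
  | succ m ih =>
    simp only [pvBest]; rw [h (m+1) le_rfl, ih (fun j hj => h j (by omega))]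

-- when the search window is closed, lo is the optimum
theorem pvBsearch_stop (ok : Nat → Bool) (n lo : Nat) (hln : lo ≤ n)
    (hok : ok lo = true ∨ lo = 0) (hbar : ∀ j, lo < j → j ≤ n → ok j = false) :
    lo = pvBest ok n := by
  have h1 : pvBest ok n ≤ lo := by
    rcases Nat.lt_or_ge lo (pvBest ok n) with h | h
    · have hble := pvBest_le ok n
      rcases pvBest_ok_or_zero ok n with hx | hx
      · have := hbar (pvBest ok n) h hble
        rw [this] at hx; cases hx
      · omega
    · exact h
  have h2 : lo ≤ pvBest ok n := by
    rcases hok with hx | hx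
    · exact pvBest_max ok hx (by omega)
    · omega
  omega

-- the binary search computes pvBest when ok is downward closed on [0, n]
theorem pvBsearch_eq_pvBest (ok : Nat → Bool) (n : Nat)
    (hmono : ∀ j k, j ≤ k → k ≤ n → ok k = true → ok j = true) :
    ∀ fuel lo hi, hi - lo ≤ fuel → lo ≤ hi → hi ≤ n → (ok lo = true ∨ lo = 0) →
      (∀ j, hi < j → j ≤ n → ok j = false) →
      pvBsearch ok lo hi = pvBest ok n := by
  intro fuel
  induction fuel with
  | zero =>
    intro lo hi hf hlh hhn hok hbar
    have he : lo = hi := by omega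
    subst he
    rw [pvBsearch, dif_neg (by omega)]
    exact pvBsearch_stop ok n lo (by omega) hok hbar
  | succ fuel ih =>
    intro lo hi hf hlh hhn hok hbar
    by_cases h : lo < hi
    · rw [pvBsearch, dif_pos h]
      simp only []
      by_cases hm : ok ((lo + hi + 1) / 2) = true
      · rw [if_pos hm]
        exact ih _ _ (by omega) (by omega) hhn (Or.inl hm) hbar
      · rw [if_neg hm]
        refine ih _ _ (by omega) (by omega) (by omega) hok ?_
        intro j hj hjn
        rcases Nat.lt_or_ge ((lo + hi + 1) / 2) (j+1) with hc | hc
        · by_cases hoj : ok j = true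
          · have := hmono ((lo + hi + 1) / 2) j (by omega) hjn hoj
            exact absurd this hm
          · simpa using hoj
        · exact hbar j (by omega) hjn
    · have he : lo = hi := by omega
      subst he
      rw [pvBsearch, dif_neg (by omega)]
      exact pvBsearch_stop ok n lo (by omega) hok hbar

-- A's loop returns the row of the pvBest-prefix
theorem pvLoopA_eq (cell_id cell_type : Int) (mesh : List Int) (ids : List Int) :
    pvLoopA cell_id cell_type mesh ids =
      (let k := pvBest (fun k =>
          decide ((pvWriteCellRow cell_id cell_type (pvDataA (ids.take k)) mesh).length < 255)) ids.length;
       let row := pvWriteCellRow cell_id cell_type (pvDataA (ids.take k)) mesh;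
       (String.ofList row, (row.length : Int))) := by
  induction ids using List.reverseRecOn with
  | nil => rw [pvLoopA.eq_def]; simp [pvBest]
  | append_singleton l x ih =>
    rw [pvLoopA.eq_def]
    by_cases hc : 255 ≤ (pvWriteCellRow cell_id cell_type (pvDataA (l ++ [x])) mesh).length
    · rw [if_pos hc]
      have hred : (match h : l ++ [x] with
          | [] => (String.ofList (pvWriteCellRow cell_id cell_type (pvDataA (l ++ [x])) mesh), ((pvWriteCellRow cell_id cell_type (pvDataA (l ++ [x])) mesh).length : Int))
          | _ :: _ => pvLoopA cell_id cell_type mesh (l ++ [x]).dropLast)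
          = pvLoopA cell_id cell_type mesh (l ++ [x]).dropLast := by
        cases l <;> rfl
      rw [hred, List.dropLast_concat, ih]
      have hok : (fun k => decide ((pvWriteCellRow cell_id cell_type (pvDataA ((l ++ [x]).take k)) mesh).length < 255)) (l.length + 1) = false := by
        simp only [List.length_append, List.length_singleton]
        rw [List.take_of_length_le (by simp)]
        simpa using hc
      have hcongr : ∀ j, j ≤ l.length →
          (fun k => decide ((pvWriteCellRow cell_id cell_type (pvDataA (l.take k)) mesh).length < 255)) j
          = (fun k => decide ((pvWriteCellRow cell_id cell_type (pvDataA ((l ++ [x]).take k)) mesh).length < 255)) j := by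
        intro j hj
        simp only []
        rw [List.take_append_of_le_length hj]
      simp only [List.length_append, List.length_singleton, pvBest, hok, Bool.false_eq_true, if_false]
      rw [pvBest_congr l.length hcongr]
      have hble := pvBest_le (fun k => decide ((pvWriteCellRow cell_id cell_type (pvDataA ((l ++ [x]).take k)) mesh).length < 255)) l.length
      rw [List.take_append_of_le_length hble]
    · rw [if_neg hc]
      have hok : (fun k => decide ((pvWriteCellRow cell_id cell_type (pvDataA ((l ++ [x]).take k)) mesh).length < 255)) (l.length + 1) = true := by
        simp only [List.length_append, List.length_singleton]
        rw [List.take_of_length_le (by simp)]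
        simpa using Nat.lt_of_not_le hc
      simp only [List.length_append, List.length_singleton, pvBest, hok, if_true]
      rw [List.take_of_length_le (by simp)]

theorem ports_eq (avci : List Int) (cid ct : Int) (mesh : List Int) :
    truncate_always_visible avci cid ct mesh = truncate_always_visible_alt avci cid ct mesh := by
  unfold truncate_always_visible truncate_always_visible_alt
  rw [pvLoopA_eq]
  simp only []
  set okB : Nat → Bool := fun m => decide (pvRowLenB (pvHeadB cid ct mesh).length (pvPreB avci) m < 255) with hokB
  set okA : Nat → Bool := fun k => decide ((pvWriteCellRow cid ct (pvDataA (avci.take k)) mesh).length < 255) with hokA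
  have hmono : ∀ j k, j ≤ k → k ≤ avci.length → okB k = true → okB j = true := by
    intro j k hjk hk h
    simp only [hokB, decide_eq_true_eq] at h ⊢
    have := pvRowLenB_mono (pvHeadB cid ct mesh).length avci hjk hk
    omega
  have hsearch : pvBsearch okB 0 avci.length = pvBest okB avci.length :=
    pvBsearch_eq_pvBest okB avci.length hmono avci.length 0 avci.length (by omega) (by omega)
      le_rfl (Or.inr rfl) (fun j hj hjn => by omega)
  have hcongr : pvBest okB avci.length = pvBest okA avci.length := by
    apply pvBest_congr
    intro j hj
    simp only [hokB, hokA]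
    rw [pvRowLen_eq cid ct mesh avci hj]
  rw [hsearch, hcongr]
  have hble := pvBest_le okA avci.length
  have htake : (avci.take (pvBest okA avci.length)).length = pvBest okA avci.length := by
    simp [List.length_take]; omega
  simp only [pvWriteCellRow, pvDataA, pvHeadB, htake, List.append_assoc, List.cons_append,
    List.nil_append]

-- ===== VERDICT (by name: the statement is the Claim_ definition above) =====
theorem truncate_always_visible_spec : Claim_equal_truncate_always_visible := by
  intro avci cid ct mesh _hdom
  exact ports_eq avci cid ct mesh
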